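-- pv_equiv track=rewrite | github.com/0xcHri/deskhero | src/ml_pipeline.py | _stem_it
-- ===== SOURCE A (Python) =====
-- def _stem_it(word):
--     """Stemming italiano minimale: tronca la vocale finale per normalizzare
--     singolare/plurale (fattura/fatture → fattur, errore/errori → error).
--     Preserva parole corte e token composti (non_xxx)."""
--     if word.startswith("non_"):
--         return "non_" + _stem_it(word[4:])
--     if len(word) <= 5:
--         return word
--     if word[-1] in "aeiou":
--         return word[:-1]
--     return word
-- ===== SOURCE B (Python) =====
-- def _stem_it(word):
--     # Different decomposition: strip all leading "non_" prefixes iteratively,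
--     # apply the base vowel-truncation rule once to the core, then rebuild.
--     k = 0
--     while word.startswith("non_"):
--         k += 1
--         word = word[4:]
--     if len(word) > 5 and word[-1] in "aeiou":
--         word = word[:-1]
--     return "non_" * k + word
-- ===== Notes on version B (the rewrite author's own statement) =====
-- stated objective: simpler
-- what changed: Replaces A's tail recursion on the 'non_' prefix with an explicit prefix-stripping loop that counts the prefixes, applies the length/vowel rule once to the core, and rebuilds the result.
import Mathlib
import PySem

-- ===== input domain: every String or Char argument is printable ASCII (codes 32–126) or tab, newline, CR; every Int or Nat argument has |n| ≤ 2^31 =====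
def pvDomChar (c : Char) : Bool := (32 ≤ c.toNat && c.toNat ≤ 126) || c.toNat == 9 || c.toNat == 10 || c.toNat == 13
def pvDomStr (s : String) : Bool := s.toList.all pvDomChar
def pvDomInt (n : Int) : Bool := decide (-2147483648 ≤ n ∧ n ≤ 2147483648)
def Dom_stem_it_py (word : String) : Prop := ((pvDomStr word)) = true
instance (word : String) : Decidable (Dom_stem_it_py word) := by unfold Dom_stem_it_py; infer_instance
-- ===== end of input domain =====

-- B replaces A's tail recursion on the "non_" prefix by one stripping loop + one base rule (objective: simpler).

-- ===== PORT A =====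
-- literal port of A's recursion, on the character list
def stemItA : List Char → List Char
  | cs =>
    if cs.take 4 = ['n', 'o', 'n', '_'] then
      -- word.startswith("non_") → "non_" + _stem_it(word[4:])
      ['n', 'o', 'n', '_'] ++ stemItA (cs.drop 4)
    else if cs.length ≤ 5 then cs
    else if cs.getLastD ' ' ∈ ['a', 'e', 'i', 'o', 'u'] then cs.dropLast
    else cs
  termination_by cs => cs.length
  decreasing_by
    rename_i h
    have := congrArg List.length h
    simp [List.length_take] at this
    simp [List.length_drop]
    exact Nat.lt_of_lt_of_le (by norm_num) this

def stem_it_py (word : String) : String := String.ofList (stemItA word.toList)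

-- ===== PORT B =====
-- while word.startswith("non_"): k += 1; word = word[4:]
def stripNon : List Char → Nat → Nat × List Char
  | cs, k =>
    if cs.take 4 = ['n', 'o', 'n', '_'] then stripNon (cs.drop 4) (k + 1)
    else (k, cs)
  termination_by cs _ => cs.length
  decreasing_by
    rename_i h
    have := congrArg List.length h
    simp [List.length_take] at this
    simp [List.length_drop]
    exact Nat.lt_of_lt_of_le (by norm_num) this

def stem_it_py_alt (word : String) : String :=
  let p := stripNon word.toList 0
  let core := if 5 < p.2.length ∧ p.2.getLastD ' ' ∈ ['a', 'e', 'i', 'o', 'u']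
              then p.2.dropLast else p.2
  String.ofList ((List.replicate p.1 ['n', 'o', 'n', '_']).flatten ++ core)

-- ===== PRECONDITION & SPEC =====
def Spec_stem_it_py (word : String) (out : String) : Prop := out = stem_it_py_alt word
instance (word : String) (out : String) : Decidable (Spec_stem_it_py word out) := by unfold Spec_stem_it_py; infer_instance

-- ===== CLAIM (what is proved, stated in full; the proofs are below) =====
def Claim_equal_stem_it_py : Prop := ∀ (word : String), Dom_stem_it_py word → Spec_stem_it_py word (stem_it_py word)

-- ===== LEMMAS AND PROOFS =====
theorem stripNon_unfold (cs : List Char) (k : Nat) :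
    stripNon cs k =
      if cs.take 4 = ['n', 'o', 'n', '_'] then stripNon (cs.drop 4) (k + 1) else (k, cs) := by
  conv_lhs => rw [stripNon]

theorem stemItA_unfold (cs : List Char) :
    stemItA cs =
      if cs.take 4 = ['n', 'o', 'n', '_'] then ['n', 'o', 'n', '_'] ++ stemItA (cs.drop 4)
      else if cs.length ≤ 5 then cs
      else if cs.getLastD ' ' ∈ ['a', 'e', 'i', 'o', 'u'] then cs.dropLast
      else cs := by
  conv_lhs => rw [stemItA]

theorem take4_len {cs : List Char} (h : cs.take 4 = ['n', 'o', 'n', '_']) : 4 ≤ cs.length := by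
  have := congrArg List.length h
  simp [List.length_take] at this
  omega

theorem stripNon_acc_aux (n : Nat) : ∀ (cs : List Char), cs.length ≤ n → ∀ (k : Nat),
    stripNon cs k = ((stripNon cs 0).1 + k, (stripNon cs 0).2) := by
  induction n with
  | zero =>
    intro cs hlen k
    have hcs : cs = [] := List.length_eq_zero_iff.mp (Nat.le_zero.mp hlen)
    subst hcs
    rw [stripNon_unfold [] k, stripNon_unfold [] 0]
    simp
  | succ n ih =>
    intro cs hlen k
    rw [stripNon_unfold cs k, stripNon_unfold cs 0]
    by_cases h : cs.take 4 = ['n', 'o', 'n', '_']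
    · have hd : (cs.drop 4).length ≤ n := by
        have := take4_len h
        simp [List.length_drop]; omega
      rw [if_pos h, if_pos h, ih _ hd (k + 1), ih _ hd 1]
      simp
      omega
    · rw [if_neg h, if_neg h]
      simp

theorem stripNon_acc (cs : List Char) (k : Nat) :
    stripNon cs k = ((stripNon cs 0).1 + k, (stripNon cs 0).2) :=
  stripNon_acc_aux cs.length cs le_rfl k

theorem stemItA_eq_aux (n : Nat) : ∀ (cs : List Char), cs.length ≤ n →
    stemItA cs =
      (List.replicate (stripNon cs 0).1 ['n', 'o', 'n', '_']).flatten ++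
        (if 5 < (stripNon cs 0).2.length ∧ (stripNon cs 0).2.getLastD ' ' ∈ ['a', 'e', 'i', 'o', 'u']
         then (stripNon cs 0).2.dropLast else (stripNon cs 0).2) := by
  induction n with
  | zero =>
    intro cs hlen
    have hcs : cs = [] := List.length_eq_zero_iff.mp (Nat.le_zero.mp hlen)
    subst hcs
    rw [stemItA_unfold, stripNon_unfold]
    simp
  | succ n ih =>
    intro cs hlen
    rw [stemItA_unfold cs, stripNon_unfold cs 0]
    by_cases h : cs.take 4 = ['n', 'o', 'n', '_']
    · have hd : (cs.drop 4).length ≤ n := by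
        have := take4_len h
        simp [List.length_drop]; omega
      rw [if_pos h, if_pos h, ih _ hd, stripNon_acc (cs.drop 4) 1]
      simp [List.replicate_succ, List.flatten_cons]
    · rw [if_neg h, if_neg h]
      have h0 : stripNon cs 0 = (0, cs) := by rw [stripNon_unfold, if_neg h]
      split_ifs with h1 h2 <;> simp_all <;> omega

theorem stemItA_eq (cs : List Char) :
    stemItA cs =
      (List.replicate (stripNon cs 0).1 ['n', 'o', 'n', '_']).flatten ++
        (if 5 < (stripNon cs 0).2.length ∧ (stripNon cs 0).2.getLastD ' ' ∈ ['a', 'e', 'i', 'o', 'u']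
         then (stripNon cs 0).2.dropLast else (stripNon cs 0).2) :=
  stemItA_eq_aux cs.length cs le_rfl

-- ===== VERDICT (by name: the statement is the Claim_ definition above) =====
theorem stem_it_py_spec : Claim_equal_stem_it_py := by
  intro word _
  unfold Spec_stem_it_py stem_it_py stem_it_py_alt
  rw [stemItA_eq]
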